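-- pv_equiv track=rewrite | github.com/bqqbarbhg/adventofcode | 2020/14/part2.py | pdep
-- ===== SOURCE A (Python) =====
-- def pdep(value, mask):
--     result = 0
--     while mask:
--         prev = mask
--         mask &= mask - 1
--         result += (mask ^ prev) * (value & 1)
--         value >>= 1
--     return result
-- ===== SOURCE B (Python) =====
-- def pdep(value, mask):
--     # Scan the mask bit-by-bit from the least significant end, keeping the
--     # current place value; deposit one value bit at each set mask position.
--     result = 0
--     place = 1
--     while mask:
--         if mask % 2:
--             result += (value % 2) * place
--             value //= 2
--         mask //= 2
--         place *= 2
--     return result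
-- ===== Notes on version B (the rewrite author's own statement) =====
-- stated objective: alternative
-- what changed: B scans the mask one bit position at a time with arithmetic (% 2, // 2) and a running place value, instead of A's isolate-and-clear-lowest-set-bit trick (mask &= mask-1; lowbit = mask ^ prev) that jumps from set bit to set bit.
import Mathlib
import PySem

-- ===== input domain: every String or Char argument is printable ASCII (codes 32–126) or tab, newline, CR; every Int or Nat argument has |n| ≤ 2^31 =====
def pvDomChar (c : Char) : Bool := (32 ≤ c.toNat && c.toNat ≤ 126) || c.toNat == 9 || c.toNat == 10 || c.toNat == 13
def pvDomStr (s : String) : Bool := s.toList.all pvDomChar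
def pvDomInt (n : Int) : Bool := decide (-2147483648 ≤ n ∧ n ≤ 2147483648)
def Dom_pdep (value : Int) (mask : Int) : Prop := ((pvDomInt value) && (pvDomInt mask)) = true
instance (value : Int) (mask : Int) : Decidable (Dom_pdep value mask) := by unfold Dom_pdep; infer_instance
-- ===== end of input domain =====

-- B replaces A's isolate-and-clear-lowest-set-bit iteration by an arithmetic least-significant-first
-- scan of every mask bit with a running place value (alternative decomposition, same cost class).


-- ===== PORT A =====
-- termination helper cited by pdepLoopA's decreasing_by: clearing the lowest set bit shrinks a positive mask
theorem pv_band_pred_lt {m : Int} (h : 0 < m) : (PySem.Int.band m (m - 1)).toNat < m.toNat := by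
  rw [PySem.Int.band_of_nonneg (by omega) (by omega)]
  have h1 : m.toNat &&& (m - 1).toNat ≤ (m - 1).toNat := Nat.and_le_right
  omega

-- `while mask:` body: prev = mask; mask &= mask - 1; result += (mask ^ prev) * (value & 1); value >>= 1.
-- Python diverges for mask < 0; the `mask ≤ 0` exit is a totality guard (Pre_pdep excludes mask < 0).
def pdepLoopA (value : Int) (mask : Int) (result : Int) : Int :=
  if h : mask ≤ 0 then result
  else
    pdepLoopA (value >>> (1 : Nat)) (PySem.Int.band mask (mask - 1))
      (result + PySem.Int.bxor (PySem.Int.band mask (mask - 1)) mask * PySem.Int.band value 1)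
termination_by mask.toNat
decreasing_by exact pv_band_pred_lt (by omega)

def pdep (value : Int) (mask : Int) : Int := pdepLoopA value mask 0

-- ===== PORT B =====
-- termination helper cited by pdepLoopB's decreasing_by
theorem pv_fdiv2_toNat_lt {m : Int} (h : 0 < m) : (PySem.Int.floordiv m 2).toNat < m.toNat := by
  rw [PySem.Int.floordiv_eq_ediv_of_pos (by norm_num)]; omega

-- `while mask:` body: if mask % 2: result += (value % 2) * place; value //= 2; then mask //= 2; place *= 2.
-- Python diverges for mask < 0; the `mask ≤ 0` exit is a totality guard (Pre_pdep excludes mask < 0).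
def pdepLoopB (value : Int) (mask : Int) (result : Int) (place : Int) : Int :=
  if h : mask ≤ 0 then result
  else if PySem.Int.mod mask 2 ≠ 0 then
    pdepLoopB (PySem.Int.floordiv value 2) (PySem.Int.floordiv mask 2)
      (result + PySem.Int.mod value 2 * place) (place * 2)
  else
    pdepLoopB value (PySem.Int.floordiv mask 2) result (place * 2)
termination_by mask.toNat
decreasing_by all_goals exact pv_fdiv2_toNat_lt (by omega)

def pdep_alt (value : Int) (mask : Int) : Int := pdepLoopB value mask 0 1

-- ===== PRECONDITION & SPEC =====
-- A's `while mask` loops forever when mask < 0 (mask &= mask-1 keeps it negative), so A returns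
-- only for mask ≥ 0; Pre_ excludes exactly the divergent inputs.
def Pre_pdep (value : Int) (mask : Int) : Prop := 0 ≤ mask
instance (value : Int) (mask : Int) : Decidable (Pre_pdep value mask) := by unfold Pre_pdep; infer_instance
def pvWitness_pdep : Int × Int := (5, 12)

def Spec_pdep (value : Int) (mask : Int) (out : Int) : Prop := out = pdep_alt value mask
instance (value : Int) (mask : Int) (out : Int) : Decidable (Spec_pdep value mask out) := by unfold Spec_pdep; infer_instance

-- ===== CLAIM (what is proved, stated in full; the proofs are below) =====
def Claim_equal_pdep : Prop := ∀ (value : Int) (mask : Int), Dom_pdep value mask → Pre_pdep value mask → Spec_pdep value mask (pdep value mask)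

-- ===== LEMMAS AND PROOFS =====

-- Nat-level bit facts used to reason about A's band/bxor steps
theorem pv_nand_even_odd (a b : Nat) : (2*a) &&& (2*b+1) = 2*(a &&& b) := by
  apply Nat.eq_of_testBit_eq; intro i
  rw [Nat.testBit_and]
  cases i with
  | zero => simp [Nat.testBit_zero]
  | succ i => simp [Nat.testBit_add_one, Nat.testBit_and, Nat.mul_add_div]

theorem pv_nand_odd_even (a b : Nat) : (2*a+1) &&& (2*b) = 2*(a &&& b) := by
  apply Nat.eq_of_testBit_eq; intro i
  rw [Nat.testBit_and]
  cases i with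
  | zero => simp [Nat.testBit_zero]
  | succ i => simp [Nat.testBit_add_one, Nat.testBit_and, Nat.mul_add_div]

theorem pv_nxor_even_even (a b : Nat) : (2*a) ^^^ (2*b) = 2*(a ^^^ b) := by
  apply Nat.eq_of_testBit_eq; intro i
  rw [Nat.testBit_xor]
  cases i with
  | zero => simp [Nat.testBit_zero]
  | succ i => simp [Nat.testBit_add_one, Nat.testBit_xor]

theorem pv_nxor_pred (a : Nat) : (2*a) ^^^ (2*a+1) = 1 := by
  apply Nat.eq_of_testBit_eq; intro i
  rw [Nat.testBit_xor]
  cases i with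
  | zero => simp [Nat.testBit_zero]
  | succ i => simp [Nat.testBit_add_one, Nat.mul_add_div]

-- Int-level consequences
theorem pv_band_double {k : Int} (hk : 0 < k) :
    PySem.Int.band (2*k) (2*k - 1) = 2 * PySem.Int.band k (k - 1) := by
  rw [PySem.Int.band_of_nonneg (by omega) (by omega),
      PySem.Int.band_of_nonneg (by omega) (by omega)]
  rw [show (2*k).toNat = 2 * k.toNat by omega,
      show (2*k - 1).toNat = 2 * (k.toNat - 1) + 1 by omega,
      show (k - 1).toNat = k.toNat - 1 by omega,
      pv_nand_even_odd]
  push_cast; ring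

theorem pv_bxor_double {a b : Int} (ha : 0 ≤ a) (hb : 0 ≤ b) :
    PySem.Int.bxor (2*a) (2*b) = 2 * PySem.Int.bxor a b := by
  rw [PySem.Int.bxor_of_nonneg (by omega) (by omega), PySem.Int.bxor_of_nonneg ha hb]
  rw [show (2*a).toNat = 2 * a.toNat by omega,
      show (2*b).toNat = 2 * b.toNat by omega,
      pv_nxor_even_even]
  push_cast; ring

theorem pv_band_pred_odd {m : Int} (h : 0 < m) (hodd : m % 2 = 1) :
    PySem.Int.band m (m - 1) = m - 1 := by
  obtain ⟨a, ha⟩ : ∃ a, m.toNat = 2 * a + 1 := ⟨m.toNat / 2, by omega⟩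
  rw [PySem.Int.band_of_nonneg (by omega) (by omega)]
  rw [show (m - 1).toNat = 2 * a by omega, ha, pv_nand_odd_even, Nat.and_self]
  omega

theorem pv_bxor_pred_odd {m : Int} (h : 0 < m) (hodd : m % 2 = 1) :
    PySem.Int.bxor (m - 1) m = 1 := by
  obtain ⟨a, ha⟩ : ∃ a, m.toNat = 2 * a + 1 := ⟨m.toNat / 2, by omega⟩
  rw [PySem.Int.bxor_of_nonneg (by omega) (by omega)]
  rw [show (m - 1).toNat = 2 * a by omega, ha, pv_nxor_pred]
  rfl

theorem pv_shift1 (v : Int) : v >>> (1 : Nat) = PySem.Int.floordiv v 2 := by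
  rw [Int.shiftRight_eq_div_pow, PySem.Int.floordiv_eq_ediv_of_pos (by norm_num)]; norm_num

-- accumulator lemmas
theorem pv_loopA_acc_aux : ∀ (n : Nat) (v m r : Int), m.toNat ≤ n →
    pdepLoopA v m r = r + pdepLoopA v m 0 := by
  intro n
  induction n with
  | zero =>
    intro v m r h
    simp [pdepLoopA, show m ≤ 0 by omega]
  | succ n ih =>
    intro v m r h
    by_cases hm : m ≤ 0
    · simp [pdepLoopA, hm]
    · have hlt : (PySem.Int.band m (m - 1)).toNat < m.toNat := pv_band_pred_lt (by omega)
      conv_lhs => rw [pdepLoopA]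
      conv_rhs => rw [pdepLoopA]
      simp only [dif_neg hm]
      rw [ih _ _ _ (by omega)]
      conv_rhs => rw [ih _ _ _ (by omega)]
      ring

theorem pv_loopA_acc (v m r : Int) : pdepLoopA v m r = r + pdepLoopA v m 0 :=
  pv_loopA_acc_aux m.toNat v m r le_rfl

theorem pv_loopB_acc_aux : ∀ (n : Nat) (v m r p : Int), m.toNat ≤ n →
    pdepLoopB v m r p = r + p * pdepLoopB v m 0 1 := by
  intro n
  induction n with
  | zero =>
    intro v m r p h
    simp [pdepLoopB, show m ≤ 0 by omega]
  | succ n ih =>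
    intro v m r p h
    by_cases hm : m ≤ 0
    · simp [pdepLoopB, hm]
    · have hlt : (PySem.Int.floordiv m 2).toNat < m.toNat := pv_fdiv2_toNat_lt (by omega)
      conv_lhs => rw [pdepLoopB]
      conv_rhs => rw [pdepLoopB]
      simp only [dif_neg hm]
      by_cases hodd : PySem.Int.mod m 2 ≠ 0
      · simp only [if_pos hodd]
        rw [ih _ _ _ _ (by omega)]
        conv_rhs => rw [ih _ _ _ _ (by omega)]
        ring
      · simp only [if_neg hodd]
        rw [ih _ _ _ _ (by omega)]
        conv_rhs => rw [ih _ _ _ _ (by omega)]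
        ring

theorem pv_loopB_acc (v m r p : Int) : pdepLoopB v m r p = r + p * pdepLoopB v m 0 1 :=
  pv_loopB_acc_aux m.toNat v m r p le_rfl

-- doubling the mask doubles A's result (value bits are consumed at the same rate)
theorem pv_loopA_double : ∀ (n : Nat) (v k : Int), 0 ≤ k → k.toNat ≤ n →
    pdepLoopA v (2*k) 0 = 2 * pdepLoopA v k 0 := by
  intro n
  induction n with
  | zero =>
    intro v k hk h
    simp [pdepLoopA, show 2*k ≤ 0 by omega, show k ≤ 0 by omega]
  | succ n ih =>
    intro v k hk h
    by_cases hk0 : k ≤ 0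
    · simp [pdepLoopA, show 2*k ≤ 0 by omega, hk0]
    · have hkpos : 0 < k := by omega
      have hlt : (PySem.Int.band k (k - 1)).toNat < k.toNat := pv_band_pred_lt hkpos
      have hnn : 0 ≤ PySem.Int.band k (k - 1) := PySem.Int.band_nonneg_of_nonneg_left _ (by omega)
      conv_lhs => rw [pdepLoopA]
      conv_rhs => rw [pdepLoopA]
      simp only [dif_neg (show ¬ (2*k ≤ 0) by omega), dif_neg (show ¬ (k ≤ 0) by omega)]
      rw [pv_band_double hkpos, pv_bxor_double hnn (le_of_lt hkpos)]
      rw [pv_loopA_acc]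
      conv_rhs => rw [pv_loopA_acc]
      rw [ih _ _ hnn (by omega)]
      ring

-- main equivalence on nonnegative masks
theorem pv_main : ∀ (n : Nat) (v m : Int), 0 ≤ m → m.toNat ≤ n →
    pdepLoopA v m 0 = pdepLoopB v m 0 1 := by
  intro n
  induction n with
  | zero =>
    intro v m hm h
    simp [pdepLoopA, pdepLoopB, show m ≤ 0 by omega]
  | succ n ih =>
    intro v m hm h
    by_cases hm0 : m ≤ 0
    · simp [pdepLoopA, pdepLoopB, hm0]
    · have hmpos : 0 < m := by omega
      have hmod : PySem.Int.mod m 2 = m % 2 := PySem.Int.mod_eq_emod_of_pos (by norm_num)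
      have hfd : PySem.Int.floordiv m 2 = m / 2 := PySem.Int.floordiv_eq_ediv_of_pos (by norm_num)
      have hdlt : (m / 2).toNat ≤ n := by omega
      have hd2 : (0:Int) ≤ m / 2 := by omega
      by_cases hodd : m % 2 = 1
      · conv_lhs => rw [pdepLoopA]
        conv_rhs => rw [pdepLoopB]
        simp only [dif_neg hm0]
        rw [pv_band_pred_odd hmpos hodd, pv_bxor_pred_odd hmpos hodd]
        rw [if_pos (show PySem.Int.mod m 2 ≠ 0 by omega)]
        rw [pv_loopA_acc, pv_loopB_acc]
        rw [show m - 1 = 2 * (m / 2) by omega]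
        rw [pv_loopA_double n _ _ hd2 hdlt]
        rw [pv_shift1, hfd, ih _ _ hd2 hdlt, PySem.Int.band_one]
        ring
      · conv_rhs => rw [pdepLoopB]
        simp only [dif_neg hm0]
        rw [if_neg (show ¬ PySem.Int.mod m 2 ≠ 0 by omega)]
        rw [pv_loopB_acc, hfd]
        conv_lhs => rw [show m = 2 * (m / 2) by omega]
        rw [pv_loopA_double n _ _ hd2 hdlt, ih _ _ hd2 hdlt]
        ring

-- ===== VERDICT (by name: the statement is the Claim_ definition above) =====
theorem pdep_spec : Claim_equal_pdep := by
  intro value mask _ hpre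
  unfold Spec_pdep pdep pdep_alt
  exact pv_main mask.toNat value mask hpre le_rfl
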